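-- pv_equiv track=rewrite | github.com/pgsteven89/locasql-explorer | src/localsql_explorer/cte_support.py | _split_cte_and_main_query
-- ===== SOURCE A (Python) =====
-- from typing import List, Dict, Optional, Tuple, Set
--
-- def _split_cte_and_main_query(sql: str) -> Tuple[str, str]:
--     """Split SQL into CTE section and main query."""
--     # Find the end of the CTE section by looking for the main SELECT/INSERT/UPDATE/DELETE
--     # This is simplified - a full parser would need to handle nested parentheses properly
--
--     lines = sql.split('\n')
--     cte_lines = []
--     main_query_lines = []
--     in_main_query = False
--
--     for line in lines:
--         stripped = line.strip().upper()
--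
--         # Look for main query keywords not in CTE AS clauses
--         if not in_main_query and any(stripped.startswith(kw) for kw in ['SELECT', 'INSERT', 'UPDATE', 'DELETE']) and 'AS' not in line.upper():
--             in_main_query = True
--
--         if in_main_query:
--             main_query_lines.append(line)
--         else:
--             cte_lines.append(line)
--
--     return '\n'.join(cte_lines), '\n'.join(main_query_lines)
-- ===== SOURCE B (Python) =====
-- from typing import Tuple
--
-- def _split_cte_and_main_query(sql: str) -> Tuple[str, str]:
--     """Split SQL into CTE section and main query."""
--     lines = sql.split('\n')
--
--     def _is_main_start(line: str) -> bool:
--         stripped = line.strip().upper()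
--         return (any(stripped.startswith(kw) for kw in ('SELECT', 'INSERT', 'UPDATE', 'DELETE'))
--                 and 'AS' not in line.upper())
--
--     i = next((idx for idx, line in enumerate(lines) if _is_main_start(line)), len(lines))
--     return '\n'.join(lines[:i]), '\n'.join(lines[i:])
-- ===== Notes on version B (the rewrite author's own statement) =====
-- stated objective: simpler
-- what changed: Replaces the stateful single loop with a running boolean and dual appends by computing the boundary index first (first main-query line, defaulting to len(lines)) and returning the two joined slices.
import Mathlib
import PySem

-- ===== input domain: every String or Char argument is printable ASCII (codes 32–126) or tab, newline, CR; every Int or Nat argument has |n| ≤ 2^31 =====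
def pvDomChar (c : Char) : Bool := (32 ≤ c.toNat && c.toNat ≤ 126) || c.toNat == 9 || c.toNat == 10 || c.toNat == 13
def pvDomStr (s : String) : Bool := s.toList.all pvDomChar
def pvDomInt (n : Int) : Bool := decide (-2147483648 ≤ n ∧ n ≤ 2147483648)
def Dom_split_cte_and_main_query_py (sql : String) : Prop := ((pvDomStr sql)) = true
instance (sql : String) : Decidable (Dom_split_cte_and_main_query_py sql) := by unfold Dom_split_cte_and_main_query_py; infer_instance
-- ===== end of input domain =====

-- B is simpler: it computes the boundary index of the first main-query line and joins the two
-- slices, instead of A's single loop threading a running boolean with dual appends. Same result.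

-- ===== PORT A =====
-- the per-line test of A's if-condition ('not in_main' is applied at the call site)
def pvMainCondA (line : String) : Bool :=
  (["SELECT", "INSERT", "UPDATE", "DELETE"].any
      (fun kw => PySem.Str.startswith (PySem.Str.upper (PySem.Str.strip line)) kw))
    && !(PySem.Str.isIn "AS" (PySem.Str.upper line))

-- one iteration of A's for-loop over state (cte_lines, main_query_lines, in_main)
def pvStepA (st : List String × List String × Bool) (line : String) :
    List String × List String × Bool :=
  let inMain := if !st.2.2 && pvMainCondA line then true else st.2.2
  if inMain then (st.1, st.2.1 ++ [line], inMain)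
  else (st.1 ++ [line], st.2.1, inMain)

def split_cte_and_main_query_py (sql : String) : String × String :=
  let lines := (PySem.Str.split? sql "\n").getD []   -- sep "\n" ≠ "", so split? is always some
  let st := lines.foldl pvStepA ([], [], false)
  (PySem.Str.join "\n" st.1, PySem.Str.join "\n" st.2.1)

-- ===== PORT B =====
def pvIsMainStart (line : String) : Bool :=
  (["SELECT", "INSERT", "UPDATE", "DELETE"].any
      (fun kw => PySem.Str.startswith (PySem.Str.upper (PySem.Str.strip line)) kw))
    && !(PySem.Str.isIn "AS" (PySem.Str.upper line))

def split_cte_and_main_query_py_alt (sql : String) : String × String :=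
  let lines := (PySem.Str.split? sql "\n").getD []   -- sep "\n" ≠ "", so split? is always some
  let i := lines.findIdx pvIsMainStart    -- = length when no line matches, as Python's next(default)
  (PySem.Str.join "\n" (lines.take i), PySem.Str.join "\n" (lines.drop i))

-- ===== PRECONDITION & SPEC =====
def Spec_split_cte_and_main_query_py (sql : String) (out : String × String) : Prop := out = split_cte_and_main_query_py_alt sql
instance (sql : String) (out : String × String) : Decidable (Spec_split_cte_and_main_query_py sql out) := by unfold Spec_split_cte_and_main_query_py; infer_instance

-- ===== CLAIM (what is proved, stated in full; the proofs are below) =====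
def Claim_equal_split_cte_and_main_query_py : Prop := ∀ (sql : String), Dom_split_cte_and_main_query_py sql → Spec_split_cte_and_main_query_py sql (split_cte_and_main_query_py sql)

-- ===== LEMMAS AND PROOFS =====

-- once in the main query, every remaining line goes to main_query_lines
theorem pvFoldA_true (lines c m : List String) :
    lines.foldl pvStepA (c, m, true) = (c, m ++ lines, true) := by
  induction lines generalizing m with
  | nil => simp
  | cons x xs ih =>
    have hstep : pvStepA (c, m, true) x = (c, m ++ [x], true) := by
      simp [pvStepA]
    rw [List.foldl_cons, hstep, ih]
    simp

-- before the main query, A's loop splits at the first line satisfying the predicate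
theorem pvFoldA_false (lines c m : List String) :
    lines.foldl pvStepA (c, m, false)
    = (c ++ lines.takeWhile (fun l => !pvMainCondA l),
        m ++ lines.dropWhile (fun l => !pvMainCondA l),
        lines.any pvMainCondA) := by
  induction lines generalizing c with
  | nil => simp
  | cons x xs ih =>
    rw [List.foldl_cons]
    by_cases h : pvMainCondA x
    · have hstep : pvStepA (c, m, false) x = (c, m ++ [x], true) := by
        simp [pvStepA, h]
      rw [hstep, pvFoldA_true]
      simp [List.takeWhile, List.dropWhile, h]
    · have hstep : pvStepA (c, m, false) x = (c ++ [x], m, false) := by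
        simp [pvStepA, h]
      rw [hstep, ih]
      simp [List.takeWhile, List.dropWhile, h]

-- B's boundary index splits the list exactly at the takeWhile/dropWhile point
theorem pvTake_findIdx (p : String → Bool) (lines : List String) :
    lines.take (lines.findIdx p) = lines.takeWhile (fun l => !p l) := by
  induction lines with
  | nil => rfl
  | cons x xs ih =>
    by_cases h : p x
    · simp [List.findIdx_cons, List.takeWhile, h]
    · simp [List.findIdx_cons, List.takeWhile, h, ih]

theorem pvDrop_findIdx (p : String → Bool) (lines : List String) :
    lines.drop (lines.findIdx p) = lines.dropWhile (fun l => !p l) := by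
  induction lines with
  | nil => rfl
  | cons x xs ih =>
    by_cases h : p x
    · simp [List.findIdx_cons, List.dropWhile, h]
    · simp [List.findIdx_cons, List.dropWhile, h, ih]

-- ===== VERDICT (by name: the statement is the Claim_ definition above) =====
theorem split_cte_and_main_query_py_spec : Claim_equal_split_cte_and_main_query_py := by
  intro sql _
  show _ = _
  unfold split_cte_and_main_query_py split_cte_and_main_query_py_alt
  have hpred : pvIsMainStart = pvMainCondA := rfl
  simp only [hpred, pvFoldA_false, pvTake_findIdx pvMainCondA, pvDrop_findIdx pvMainCondA,
    List.nil_append]
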